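-- pv_equiv track=rewrite | github.com/ssafy-gwangju-03-java/marathon-algorithms | week_05/문제_01/임준희_13422.py | solve
-- ===== SOURCE A (Python) =====
-- def solve(N, M, K, houses):
--     # N과 M이 같은 경우 처리
--     if N == M:
--         return 1 if sum(houses) < K else 0
--
--     # 원형 리스트를 만들기 위해 집 리스트를 두 번 반복
--     circle = houses + houses[:M-1]
--
--     # 초기 윈도우 합 계산
--     window_sum = sum(circle[:M])
--
--     # 가능한 방법의 수 초기화
--     count = 1 if window_sum < K else 0
--
--     # 슬라이딩 윈도우
--     for i in range(N-1):
--         # 윈도우에서 첫 번째 집을 제거하고 새로운 집을 추가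
--         window_sum = window_sum - circle[i] + circle[i+M]
--
--         # K 미만인 경우 유효한 방법으로 카운트
--         if window_sum < K:
--             count += 1
--
--     return count
-- ===== SOURCE B (Python) =====
-- def solve(N, M, K, houses):
--     if N == M:
--         return 1 if sum(houses) < K else 0
--     circle = houses + houses[:M-1]
--     # prefix-sum table: P[j] = sum(circle[:j])
--     P = [0]
--     for x in circle:
--         P.append(P[-1] + x)
--     # rotation 0 is read off its slice sum; rotations 1..N-1 via the table
--     count = 1 if sum(circle[:M]) < K else 0
--     for i in range(1, N):
--         if P[i+M] - P[i] < K: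
--             count += 1
--     return count
-- ===== Notes on version B (the rewrite author's own statement) =====
-- stated objective: alternative
-- what changed: Replaces the stateful sliding-window recurrence (window_sum updated in place by subtracting the leaving house and adding the entering one) by a prefix-sum table over the circular list, each rotation's window sum computed independently as P[i+M]-P[i]; rotation 0 is read off its slice sum directly.
-- outside the precondition, e.g. on solve(4, -3, 0, [3, -2, 1]): A returns 0, B returns 2; on solve(3, 2, 5, [1, 2]): A raises IndexError, B raises IndexError
import Mathlib
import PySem

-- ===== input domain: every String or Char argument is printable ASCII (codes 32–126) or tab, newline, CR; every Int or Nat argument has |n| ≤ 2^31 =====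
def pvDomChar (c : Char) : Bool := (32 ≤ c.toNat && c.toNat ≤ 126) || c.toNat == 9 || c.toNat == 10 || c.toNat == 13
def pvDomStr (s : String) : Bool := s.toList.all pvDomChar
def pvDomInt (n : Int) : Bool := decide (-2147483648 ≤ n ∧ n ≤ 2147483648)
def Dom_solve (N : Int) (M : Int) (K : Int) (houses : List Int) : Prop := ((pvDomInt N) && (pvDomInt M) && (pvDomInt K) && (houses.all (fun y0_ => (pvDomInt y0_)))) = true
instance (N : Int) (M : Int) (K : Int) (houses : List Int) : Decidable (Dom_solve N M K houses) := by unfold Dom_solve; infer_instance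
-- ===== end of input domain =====

-- B replaces A's stateful sliding-window update by a prefix-sum table with each circular
-- window sum computed independently as P[i+M]-P[i]; same cost, different decomposition.


-- ===== PORT A =====
def solve (N : Int) (M : Int) (K : Int) (houses : List Int) : Int :=
  if N == M then (if houses.sum < K then 1 else 0)
  else
    let circle := houses ++ PySem.List.slice houses none (some (M - 1))
    let windowSum0 := (PySem.List.slice circle none (some M)).sum
    let count0 : Int := if windowSum0 < K then 1 else 0
    ((PySem.List.pyRange 0 (N - 1) 1).foldl
      (fun (st : Int × Int) i =>
        let ws := st.1 - PySem.List.pyGetD circle i 0 + PySem.List.pyGetD circle (i + M) 0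
        (ws, if ws < K then st.2 + 1 else st.2)) (windowSum0, count0)).2

-- ===== PORT B =====
def solve_alt (N : Int) (M : Int) (K : Int) (houses : List Int) : Int :=
  if N == M then (if houses.sum < K then 1 else 0)
  else
    let circle := houses ++ PySem.List.slice houses none (some (M - 1))
    let P := circle.foldl (fun acc x => acc ++ [PySem.List.pyGetD acc (-1) 0 + x]) [(0 : Int)]
    let count0 : Int := if (PySem.List.slice circle none (some M)).sum < K then 1 else 0
    (PySem.List.pyRange 1 N 1).foldl
      (fun count i =>
        if PySem.List.pyGetD P (i + M) 0 - PySem.List.pyGetD P i 0 < K then count + 1 else count)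
      count0

-- length of circle = houses + houses[:M-1], in closed form (used by Pre_)
def cLen (M : Int) (houses : List Int) : Int :=
  (houses.length : Int) + (PySem.List.clampIdx houses.length (M - 1) : Int)

-- ===== PRECONDITION & SPEC =====
-- Pre_ excludes only inputs with N ≥ 2 and N ≠ M on which either A raises IndexError
-- (window indices beyond the circular list) or M < 0, where both programs return values
-- that are accidents of Python negative-index wraparound (A wraps its reads of circle,
-- B wraps its reads of the prefix table) and neither value is the specified one.
def Pre_solve (N : Int) (M : Int) (K : Int) (houses : List Int) : Prop :=
  N = M ∨ N ≤ 1 ∨ (0 ≤ M ∧ N - 1 ≤ cLen M houses ∧ N + M - 1 ≤ cLen M houses)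
instance (N : Int) (M : Int) (K : Int) (houses : List Int) : Decidable (Pre_solve N M K houses) := by unfold Pre_solve; infer_instance
instance (N : Int) (M : Int) (K : Int) (houses : List Int) : Decidable (Pre_solve N M K houses) := by unfold Pre_solve; infer_instance
def pvWitness_solve : Int × Int × Int × List Int := (4, 2, 10, [1, 2, 3, 4])

def Spec_solve (N : Int) (M : Int) (K : Int) (houses : List Int) (out : Int) : Prop := out = solve_alt N M K houses
instance (N : Int) (M : Int) (K : Int) (houses : List Int) (out : Int) : Decidable (Spec_solve N M K houses out) := by unfold Spec_solve; infer_instance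

-- ===== CLAIM (what is proved, stated in full; the proofs are below) =====
def Claim_equal_solve : Prop := ∀ (N : Int) (M : Int) (K : Int) (houses : List Int), Dom_solve N M K houses → Pre_solve N M K houses → Spec_solve N M K houses (solve N M K houses)

-- ===== LEMMAS AND PROOFS =====

-- running prefix sums starting after s
def pfx (s : Int) : List Int → List Int
  | [] => []
  | x :: xs => (s + x) :: pfx (s + x) xs

theorem pfx_build (l : List Int) : ∀ (acc : List Int) (s : Int), acc.getLast? = some s →
    l.foldl (fun acc x => acc ++ [PySem.List.pyGetD acc (-1) 0 + x]) acc = acc ++ pfx s l := by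
  induction l with
  | nil => intro acc s _; simp [pfx]
  | cons x xs ih =>
    intro acc s hs
    have hne : acc ≠ [] := by intro h; simp [h] at hs
    have hlast : PySem.List.pyGetD acc (-1) 0 = s := by
      rw [PySem.List.pyGetD_neg_one acc 0 hne]
      have h2 := hs
      rw [List.getLast?_eq_getLast hne] at h2
      exact Option.some.inj h2
    simp only [List.foldl_cons, hlast]
    rw [ih (acc ++ [s + x]) (s + x) (by simp)]
    simp [pfx]

theorem pfx_getD (l : List Int) : ∀ (s : Int) (j : Nat), j < l.length →
    (pfx s l).getD j 0 = s + (l.take (j + 1)).sum := by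
  induction l with
  | nil => intro s j h; simp at h
  | cons x xs ih =>
    intro s j h
    cases j with
    | zero => simp [pfx]
    | succ j =>
      simp only [pfx, List.getD_cons_succ, List.take_succ_cons, List.sum_cons]
      rw [ih (s + x) j (by simpa using h)]
      ring

-- P j = sum of the first j elements, for j ≤ length
theorem P_getD (circle : List Int) (j : Nat) (hj : j ≤ circle.length) :
    ([(0 : Int)] ++ pfx 0 circle).getD j 0 = (circle.take j).sum := by
  cases j with
  | zero => simp
  | succ j =>
    have hj' : j < circle.length := by omega
    simp only [List.cons_append, List.nil_append, List.getD_cons_succ]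
    rw [pfx_getD circle 0 j hj']
    simp

theorem sum_take_succ (l : List Int) (j : Nat) (h : j < l.length) :
    (l.take (j + 1)).sum = (l.take j).sum + l.getD j 0 := by
  rw [List.sum_take_succ l j h]
  simp [List.getD, List.getElem?_eq_getElem h]

-- window sum of length m starting at j, expressed via prefix sums
def win (circle : List Int) (m j : Nat) : Int :=
  (circle.take (j + m)).sum - (circle.take j).sum

theorem win_succ (circle : List Int) (m j : Nat) (h : j + m < circle.length) :
    win circle m (j + 1) =
      win circle m j - circle.getD j 0 + circle.getD (j + m) 0 := by
  unfold win
  have h1 : (circle.take (j + 1)).sum = (circle.take j).sum + circle.getD j 0 :=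
    sum_take_succ circle j (by omega)
  have h2 : (circle.take (j + m + 1)).sum = (circle.take (j + m)).sum + circle.getD (j + m) 0 :=
    sum_take_succ circle (j + m) h
  have : j + 1 + m = j + m + 1 := by omega
  rw [this, h2, h1]
  ring

-- A's sliding loop: invariant over the first t steps
theorem slide_inv (circle : List Int) (m : Nat) (K : Int) (ws0 c0 : Int)
    (hws0 : ws0 = win circle m 0) (t : Nat) (ht : t + m ≤ circle.length) :
    (PySem.List.pyRange 0 (t : Int) 1).foldl
      (fun (st : Int × Int) i =>
        let ws := st.1 - PySem.List.pyGetD circle i 0 + PySem.List.pyGetD circle (i + (m : Int)) 0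
        (ws, if ws < K then st.2 + 1 else st.2)) (ws0, c0)
      = (win circle m t,
         c0 + ((List.range t).countP (fun j => decide (win circle m (j + 1) < K)) : Int)) := by
  induction t with
  | zero =>
    simp [PySem.List.pyRange_one_eq_nil, hws0]
  | succ t ih =>
    have hlt : t + m < circle.length := by omega
    have hrange : PySem.List.pyRange 0 ((t : Int) + 1) 1
        = PySem.List.pyRange 0 (t : Int) 1 ++ [(t : Int)] :=
      PySem.List.pyRange_one_succ_right (by positivity)
    have hcast : ((t + 1 : Nat) : Int) = (t : Int) + 1 := by push_cast; ring
    rw [hcast, hrange, List.foldl_append, ih (by omega)]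
    simp only [List.foldl_cons, List.foldl_nil]
    have hg1 : PySem.List.pyGetD circle (t : Int) 0 = circle.getD t 0 := by
      rw [PySem.List.pyGetD_natCast]
    have hg2 : PySem.List.pyGetD circle ((t : Int) + (m : Int)) 0 = circle.getD (t + m) 0 := by
      have hc : (t : Int) + (m : Int) = ((t + m : Nat) : Int) := by push_cast; ring
      rw [hc, PySem.List.pyGetD_natCast]
    have hw : win circle m t - circle.getD t 0 + circle.getD (t + m) 0 = win circle m (t + 1) :=
      (win_succ circle m t hlt).symm
    simp only [hg1, hg2, hw]
    rw [List.range_succ, List.countP_append]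
    by_cases hK : win circle m (t + 1) < K <;> simp [hK] <;> push_cast <;> ring

-- generic: B's counting fold is a countP
theorem foldl_count (l : List Int) (p : Int → Prop) [DecidablePred p] : ∀ (c : Int),
    l.foldl (fun cnt i => if p i then cnt + 1 else cnt) c
      = c + ((l.countP (fun i => decide (p i))) : Int) := by
  induction l with
  | nil => intro c; simp
  | cons x xs ih =>
    intro c
    by_cases h : p x <;> simp [h, ih] <;> push_cast <;> ring

theorem length_slice_none (xs : List Int) (b : Int) :
    (PySem.List.slice xs none (some b)).length = PySem.List.clampIdx xs.length b := by
  rw [← PySem.List.slice_zero_start, PySem.List.length_slice]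
  have h0 : PySem.List.clampIdx xs.length (0 : Int) = 0 := by
    simpa using PySem.List.clampIdx_natCast xs.length 0
  rw [h0]
  omega

-- ===== VERDICT (by name: the statement is the Claim_ definition above) =====
theorem solve_spec : Claim_equal_solve := by
  intro N M K houses _ hpre
  unfold Spec_solve solve solve_alt
  by_cases hNM : N = M
  · simp [hNM]
  · have hbeq : (N == M) = false := by simp [hNM]
    rw [hbeq]
    simp only [Bool.false_eq_true, if_false]
    set circle := houses ++ PySem.List.slice houses none (some (M - 1)) with hcirc
    have hP : circle.foldl (fun acc x => acc ++ [PySem.List.pyGetD acc (-1) 0 + x]) [(0 : Int)]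
        = [(0 : Int)] ++ pfx 0 circle := pfx_build circle [(0 : Int)] 0 (by simp)
    rw [hP]
    set P := [(0 : Int)] ++ pfx 0 circle with hPdef
    by_cases hN1 : N ≤ 1
    · -- both loops are empty: A and B return the identical count0
      rw [PySem.List.pyRange_one_eq_nil (show N - 1 ≤ 0 by omega),
        PySem.List.pyRange_one_eq_nil (show N ≤ 1 from hN1)]
      simp
    · -- N ≥ 2: Pre_ gives 0 ≤ M and the in-range bounds
      obtain ⟨hM0, hb1, hb2⟩ : 0 ≤ M ∧ N - 1 ≤ cLen M houses ∧ N + M - 1 ≤ cLen M houses := by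
        rcases hpre with h | h | h
        · exact absurd h hNM
        · exact absurd h hN1
        · exact h
      obtain ⟨n, hn⟩ : ∃ n : Nat, N = (n : Int) := ⟨N.toNat, by omega⟩
      obtain ⟨m, hm⟩ : ∃ m : Nat, M = (m : Int) := ⟨M.toNat, by omega⟩
      have hn2 : 2 ≤ n := by omega
      have hcl : (circle.length : Int) = cLen M houses := by
        rw [hcirc, List.length_append, length_slice_none]
        unfold cLen
        push_cast
        ring
      have hb1' : n - 1 ≤ circle.length := by omega
      have hb2' : n - 1 + m ≤ circle.length := by omega
      -- initial window sum is win circle m 0 (both programs use the same slice sum)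
      have hws0 : (PySem.List.slice circle none (some M)).sum = win circle m 0 := by
        rw [PySem.List.slice_to circle hM0]
        unfold win
        rw [hm]
        simp
      rw [hws0]
      -- A side: the sliding loop
      have hstep : (fun (st : Int × Int) i =>
          let ws := st.1 - PySem.List.pyGetD circle i 0 + PySem.List.pyGetD circle (i + M) 0
          (ws, if ws < K then st.2 + 1 else st.2))
        = (fun (st : Int × Int) i =>
          let ws := st.1 - PySem.List.pyGetD circle i 0 + PySem.List.pyGetD circle (i + (m : Int)) 0
          (ws, if ws < K then st.2 + 1 else st.2)) := by
        rw [hm]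
      have hN1' : N - 1 = ((n - 1 : Nat) : Int) := by omega
      rw [hN1', hstep, slide_inv circle m K (win circle m 0)
          (if win circle m 0 < K then 1 else 0) rfl (n - 1) hb2']
      -- B side: the counting loop over range(1, N)
      have hrangeB : PySem.List.pyRange 1 N 1
          = (List.range (n - 1)).map (fun (k : Nat) => 1 + (k : Int)) := by
        rw [PySem.List.pyRange_one]
        have : (N - 1).toNat = n - 1 := by omega
        rw [this]
      rw [hrangeB,
        foldl_count _ (fun i => PySem.List.pyGetD P (i + M) 0 - PySem.List.pyGetD P i 0 < K) _,
        List.countP_map]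
      have hcong : List.countP
            ((fun i => decide (PySem.List.pyGetD P (i + M) 0 - PySem.List.pyGetD P i 0 < K))
              ∘ fun (k : Nat) => 1 + (k : Int)) (List.range (n - 1))
          = List.countP (fun j => decide (win circle m (j + 1) < K)) (List.range (n - 1)) := by
        refine List.countP_congr ?_
        intro k hk
        simp only [List.mem_range] at hk
        simp only [Function.comp_def]
        have h1 : PySem.List.pyGetD P (1 + (k : Int) + M) 0 = (circle.take (k + 1 + m)).sum := by
          have hc : 1 + (k : Int) + M = ((k + 1 + m : Nat) : Int) := by omega
          rw [hc, PySem.List.pyGetD_natCast]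
          exact P_getD circle (k + 1 + m) (by omega)
        have h2 : PySem.List.pyGetD P (1 + (k : Int)) 0 = (circle.take (k + 1)).sum := by
          have hc : 1 + (k : Int) = ((k + 1 : Nat) : Int) := by omega
          rw [hc, PySem.List.pyGetD_natCast]
          exact P_getD circle (k + 1) (by omega)
        rw [h1, h2]
        unfold win
        rfl
      rw [hcong]
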